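-- pv_equiv track=rewrite | github.com/yasha1971-coder/glyph-engine | tools/chunk_pair_conjunction_diagnostic_v1.py | pair_conjunction_rank
-- ===== SOURCE A (Python) =====
-- from collections import Counter
-- from itertools import combinations
--
-- def pair_conjunction_rank(sig_chunksets, pair_limit=128):
--     """
--     sig_chunksets: list[(sig_hex, set(chunk_ids))]
--     Returns:
--       ranked_chunks: list[(cid, pair_support, singleton_support)]
--       pair_sizes: list[int]
--     """
--     # smaller DF first is more informative
--     sig_chunksets = [(s, cs) for s, cs in sig_chunksets if cs]
--     sig_chunksets.sort(key=lambda x: (len(x[1]), x[0]))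
--
--     if len(sig_chunksets) < 2:
--         return [], []
--
--     # use only most informative signatures to keep pair count bounded
--     max_sigs = min(len(sig_chunksets), 16)
--     sig_chunksets = sig_chunksets[:max_sigs]
--
--     pair_counter = Counter()
--     singleton_counter = Counter()
--     pair_sizes = []
--
--     for _sig, cset in sig_chunksets:
--         for cid in cset:
--             singleton_counter[cid] += 1
--
--     all_pairs = list(combinations(range(len(sig_chunksets)), 2))
--     if len(all_pairs) > pair_limit:
--         all_pairs = all_pairs[:pair_limit]
--
--     for i, j in all_pairs:
--         cset = sig_chunksets[i][1] & sig_chunksets[j][1]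
--         pair_sizes.append(len(cset))
--         for cid in cset:
--             pair_counter[cid] += 1
--
--     ranked = []
--     candidate_ids = set(pair_counter.keys()) | set(singleton_counter.keys())
--     for cid in candidate_ids:
--         ranked.append((cid, pair_counter[cid], singleton_counter[cid]))
--
--     ranked.sort(key=lambda x: (-x[1], -x[2], x[0]))
--     return ranked, pair_sizes
-- ===== SOURCE B (Python) =====
-- from itertools import combinations
--
-- def pair_conjunction_rank(sig_chunksets, pair_limit=128):
--     # same selection: non-empty sets, sorted by (len, sig), capped at 16
--     sel = sorted([(s, cs) for s, cs in sig_chunksets if cs],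
--                  key=lambda x: (len(x[1]), x[0]))[:16]
--     if len(sel) < 2:
--         return [], []
--
--     all_pairs = list(combinations(range(len(sel)), 2))
--     if len(all_pairs) > pair_limit:
--         all_pairs = all_pairs[:pair_limit]
--     allowed = set(all_pairs)
--
--     # inverted index: cid -> list of signature indices whose set contains cid
--     inv = {}
--     for idx, (_s, cs) in enumerate(sel):
--         for cid in cs:
--             inv.setdefault(cid, []).append(idx)
--
--     buckets = {p: 0 for p in all_pairs}
--     ranked = []
--     for cid, idxs in inv.items():
--         psup = 0
--         for q in combinations(idxs, 2):
--             if q in allowed: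
--                 psup += 1
--                 buckets[q] += 1
--         ranked.append((cid, psup, len(idxs)))
--
--     ranked.sort(key=lambda x: (-x[1], -x[2], x[0]))
--     return ranked, [buckets[p] for p in all_pairs]
-- ===== Notes on version B (the rewrite author's own statement) =====
-- stated objective: alternative
-- what changed: Replaces the per-pair set intersections and the two Counters with one inverted index cid -> list of selected signature indices: singleton support is the list length, pair support and the per-pair size buckets are accumulated by counting each cid's index pairs that fall in the allowed (truncated) pair prefix.
import Mathlib
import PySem

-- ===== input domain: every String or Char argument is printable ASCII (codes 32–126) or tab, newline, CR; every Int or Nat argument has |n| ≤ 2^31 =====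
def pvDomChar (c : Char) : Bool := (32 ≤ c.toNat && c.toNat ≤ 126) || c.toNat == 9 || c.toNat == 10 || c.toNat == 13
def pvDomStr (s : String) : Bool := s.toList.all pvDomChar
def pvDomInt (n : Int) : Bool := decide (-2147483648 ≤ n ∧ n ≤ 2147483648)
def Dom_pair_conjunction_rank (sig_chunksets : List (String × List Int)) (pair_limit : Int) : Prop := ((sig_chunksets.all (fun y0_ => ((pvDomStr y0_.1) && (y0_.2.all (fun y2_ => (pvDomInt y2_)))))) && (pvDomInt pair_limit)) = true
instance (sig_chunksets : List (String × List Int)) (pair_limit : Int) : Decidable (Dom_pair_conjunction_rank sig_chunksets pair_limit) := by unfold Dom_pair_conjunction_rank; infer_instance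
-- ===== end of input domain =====

-- B replaces the per-pair set intersections and the two Counters of A with one inverted index
-- cid -> list of selected signature indices; same return value, similar cost (objective: alternative).

-- Python's 3-component sort key (-pair, -singleton, cid), compared lexicographically.
def pvKey3 (x : Int × Int × Int) : Int ×ₗ (Int ×ₗ Int) := toLex (-x.2.1, toLex (-x.2.2, x.1))

-- ===== PORT A =====
-- Each chunk-id collection is a Python set; per the type convention the list holds its
-- distinct elements, modelled by PySem.Set.ofList.  All outputs of the function are
-- independent of the set-iteration order, so first-insertion order is exact here.
def pair_conjunction_rank (sig_chunksets : List (String × List Int)) (pair_limit : Int) : (List (Int × Int × Int)) × List Int :=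
  -- sig_chunksets = [(s, cs) for s, cs in sig_chunksets if cs]; sort by (len(cs), s)
  let scs := PySem.List.sorted2
      ((sig_chunksets.map (fun p => (p.1, PySem.Set.ofList p.2))).filter (fun p => !p.2.isEmpty))
      (fun x => ((x.2.length : Int))) (fun x => x.1)
  if scs.length < 2 then ([], [])
  else
    let max_sigs : Int := min (scs.length : Int) 16
    let scs := PySem.List.slice scs none (some max_sigs)
    -- singleton counter: for _sig, cset in scs: for cid in cset: += 1
    let singleton_counter : PySem.Dict Int Int :=
      scs.foldl (fun d p => p.2.foldl (fun d cid => d.modify cid 0 (· + 1)) d) PySem.Dict.empty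
    let all_pairs := PySem.List.combinations (PySem.List.pyRange 0 (scs.length : Int)) 2
    let all_pairs := if (all_pairs.length : Int) > pair_limit then PySem.List.slice all_pairs none (some pair_limit) else all_pairs
    -- for i, j in all_pairs: cset = scs[i][1] & scs[j][1]; pair_sizes.append(len); count cids
    let st := all_pairs.foldl (fun (st : PySem.Dict Int Int × List Int) pr =>
        -- 'for i, j in all_pairs' unpacks the 2-element pair pr (hand port, exact: pr = [i, j])
        let i := PySem.List.pyGetD pr 0 0
        let j := PySem.List.pyGetD pr 1 0
        let cset := PySem.Set.inter (PySem.List.pyGetD scs i ("", [])).2 (PySem.List.pyGetD scs j ("", [])).2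
        (cset.foldl (fun d cid => d.modify cid 0 (· + 1)) st.1, st.2 ++ [(cset.length : Int)]))
      (PySem.Dict.empty, [])
    let pair_counter := st.1
    let pair_sizes := st.2
    let candidate_ids := PySem.Set.union (PySem.Set.ofList pair_counter.keys) singleton_counter.keys
    let ranked := candidate_ids.foldl
      (fun acc cid => acc ++ [(cid, pair_counter.getD cid 0, singleton_counter.getD cid 0)]) []
    (PySem.List.sorted ranked pvKey3, pair_sizes)

-- ===== PORT B =====
def pair_conjunction_rank_alt (sig_chunksets : List (String × List Int)) (pair_limit : Int) : (List (Int × Int × Int)) × List Int :=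
  -- sel = sorted([(s, cs) for s, cs in sig_chunksets if cs], key=(len, sig))[:16]
  let sel := PySem.List.slice
      (PySem.List.sorted2
        ((sig_chunksets.map (fun p => (p.1, PySem.Set.ofList p.2))).filter (fun p => !p.2.isEmpty))
        (fun x => ((x.2.length : Int))) (fun x => x.1))
      none (some 16)
  if sel.length < 2 then ([], [])
  else
    let all_pairs := PySem.List.combinations (PySem.List.pyRange 0 (sel.length : Int)) 2
    let all_pairs := if (all_pairs.length : Int) > pair_limit then PySem.List.slice all_pairs none (some pair_limit) else all_pairs
    let allowed := PySem.Set.ofList all_pairs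
    -- inverted index: for idx, (_s, cs) in enumerate(sel): inv.setdefault(cid, []).append(idx)
    let inv : PySem.Dict Int (List Int) :=
      (PySem.List.enumerate sel).foldl
        (fun d ip => ip.2.2.foldl (fun d cid => d.modify cid [] (· ++ [ip.1])) d) PySem.Dict.empty
    -- buckets = {p: 0 for p in all_pairs}
    let buckets : PySem.Dict (List Int) Int := all_pairs.foldl (fun d p => d.insert p 0) PySem.Dict.empty
    -- for cid, idxs in inv.items(): count this cid's index pairs that are allowed
    let st := inv.items.foldl
      (fun (st : PySem.Dict (List Int) Int × List (Int × Int × Int)) item =>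
        let inner := (PySem.List.combinations item.2 2).foldl
          (fun (s : Int × PySem.Dict (List Int) Int) q =>
            if PySem.Set.contains allowed q then (s.1 + 1, s.2.modify q 0 (· + 1)) else s)
          (0, st.1)
        (inner.2, st.2 ++ [(item.1, inner.1, (item.2.length : Int))]))
      (buckets, [])
    (PySem.List.sorted st.2 pvKey3, all_pairs.map (fun p => st.1.getD p 0))

-- ===== PRECONDITION & SPEC =====
def Spec_pair_conjunction_rank (sig_chunksets : List (String × List Int)) (pair_limit : Int) (out : (List (Int × Int × Int)) × List Int) : Prop := out = pair_conjunction_rank_alt sig_chunksets pair_limit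
instance (sig_chunksets : List (String × List Int)) (pair_limit : Int) (out : (List (Int × Int × Int)) × List Int) : Decidable (Spec_pair_conjunction_rank sig_chunksets pair_limit out) := by unfold Spec_pair_conjunction_rank; infer_instance

-- ===== CLAIM (what is proved, stated in full; the proofs are below) =====
def Claim_equal_pair_conjunction_rank : Prop := ∀ (sig_chunksets : List (String × List Int)) (pair_limit : Int), Dom_pair_conjunction_rank sig_chunksets pair_limit → Spec_pair_conjunction_rank sig_chunksets pair_limit (pair_conjunction_rank sig_chunksets pair_limit)

-- ===== LEMMAS AND PROOFS =====

-- ---- proof-only helpers ----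
def pvFlat (sel : List (String × List Int)) : List Int := sel.flatMap (fun p => p.2)

def pvCs (sel : List (String × List Int)) (i : Int) : List Int := (PySem.List.pyGetD sel i ("", [])).2

def pvInter (sel : List (String × List Int)) (p : List Int) : List Int :=
  PySem.Set.inter (pvCs sel (PySem.List.pyGetD p 0 0)) (pvCs sel (PySem.List.pyGetD p 1 0))

def pvOcc (sel : List (String × List Int)) (cid : Int) : List Int :=
  ((PySem.List.enumerate sel).filter (fun ip => decide (cid ∈ ip.2.2))).map (fun ip => ip.1)

def pvAllP (sel : List (String × List Int)) : List (List Int) :=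
  PySem.List.combinations (PySem.List.pyRange 0 (sel.length : Int)) 2

def pvPairs (sel : List (String × List Int)) (pl : Int) : List (List Int) :=
  if ((pvAllP sel).length : Int) > pl then PySem.List.slice (pvAllP sel) none (some pl) else pvAllP sel

def pvPc (sel : List (String × List Int)) (pl : Int) (cid : Int) : Int :=
  ((pvPairs sel pl).countP (fun p => decide (cid ∈ pvInter sel p)) : Int)

def pvSc (sel : List (String × List Int)) (cid : Int) : Int := ((pvFlat sel).count cid : Int)

def pvSize (sel : List (String × List Int)) (pl : Int) (p : List Int) : Int :=
  (((PySem.Set.ofList (pvFlat sel)).countP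
      (fun cid => decide (p ∈ PySem.List.combinations (pvOcc sel cid) 2)) : Nat) : Int)

-- ---- generic lemmas ----
theorem pvKey3_inj : Function.Injective pvKey3 := by
  intro a b hab
  have h1 : -a.2.1 = -b.2.1 := congrArg (fun p => (ofLex p).1) hab
  have h2 : -a.2.2 = -b.2.2 := congrArg (fun p => (ofLex (ofLex p).2).1) hab
  have h3 : a.1 = b.1 := congrArg (fun p => (ofLex (ofLex p).2).2) hab
  exact Prod.ext h3 (Prod.ext (by omega) (by omega))

theorem pv_comb_nodup {α : Type} (xs : List α) (r : Nat) (h : xs.Nodup) :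
    (PySem.List.combinations xs r).Nodup := by
  induction xs generalizing r with
  | nil =>
    cases r with
    | zero => simp [PySem.List.combinations_zero]
    | succ r => simp [PySem.List.combinations_nil_succ]
  | cons x xs ih =>
    have hx : x ∉ xs := (List.nodup_cons.mp h).1
    have hxs : xs.Nodup := (List.nodup_cons.mp h).2
    cases r with
    | zero => simp [PySem.List.combinations_zero]
    | succ r =>
      rw [PySem.List.combinations_cons_succ]
      apply List.Nodup.append
      · exact (ih r hxs).map (fun a b hab => by injection hab)
      · exact ih (r + 1) hxs
      · intro c hc1 hc2
        obtain ⟨c', _, rfl⟩ := List.mem_map.mp hc1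
        have hsub := ((PySem.List.mem_combinations_iff _ _ _).mp hc2).1
        exact hx (hsub.subset (List.mem_cons_self))

theorem pv_pairwise_pyRange (a b : Int) : (PySem.List.pyRange a b).Pairwise (· < ·) := by
  rw [List.pairwise_iff_getElem]
  intro i j hi hj hij
  rw [PySem.List.getElem_pyRange_one, PySem.List.getElem_pyRange_one]
  omega

theorem pv_pair_sublist {l : List Int} (h : l.Pairwise (· < ·)) (i j : Int) :
    ([i, j].Sublist l) ↔ (i ∈ l ∧ j ∈ l ∧ i < j) := by
  induction l with
  | nil => simp
  | cons a t ih =>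
    rw [List.pairwise_cons] at h
    obtain ⟨h1, h2⟩ := h
    constructor
    · intro hs
      cases hs with
      | cons _ hs =>
        obtain ⟨hit, hjt, hij⟩ := (ih h2).mp hs
        exact ⟨List.mem_cons_of_mem _ hit, List.mem_cons_of_mem _ hjt, hij⟩
      | cons₂ _ hs =>
        have hjt : j ∈ t := List.singleton_sublist.mp hs
        exact ⟨List.mem_cons_self, List.mem_cons_of_mem _ hjt, h1 j hjt⟩
    · rintro ⟨hit, hjt, hij⟩
      rcases List.mem_cons.mp hit with rfl | hit'
      · rcases List.mem_cons.mp hjt with rfl | hjt'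
        · omega
        · exact (List.singleton_sublist.mpr hjt').cons₂ _
      · rcases List.mem_cons.mp hjt with rfl | hjt'
        · exact absurd (h1 i hit') (by omega)
        · exact ((ih h2).mpr ⟨hit', hjt', hij⟩).cons _

theorem pv_mem_allP (sel : List (String × List Int)) (p : List Int) :
    p ∈ pvAllP sel ↔ ∃ i j : Int, p = [i, j] ∧ 0 ≤ i ∧ i < j ∧ j < (sel.length : Int) := by
  unfold pvAllP
  rw [PySem.List.mem_combinations_iff]
  constructor
  · rintro ⟨hsub, hlen⟩
    obtain ⟨i, j, rfl⟩ := List.length_eq_two.mp hlen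
    obtain ⟨hi, hj, hij⟩ := (pv_pair_sublist (pv_pairwise_pyRange _ _) i j).mp hsub
    rw [PySem.List.mem_pyRange_one] at hi hj
    exact ⟨i, j, rfl, by omega, by omega, by omega⟩
  · rintro ⟨i, j, rfl, h0, hij, hjm⟩
    refine ⟨(pv_pair_sublist (pv_pairwise_pyRange _ _) i j).mpr ⟨?_, ?_, hij⟩, rfl⟩
    · rw [PySem.List.mem_pyRange_one]; omega
    · rw [PySem.List.mem_pyRange_one]; omega

theorem pv_allP_nodup (sel : List (String × List Int)) : (pvAllP sel).Nodup := by
  exact pv_comb_nodup _ _ (PySem.List.nodup_pyRange_one _ _)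

theorem pv_slice_to_sublist {α : Type} (xs : List α) (b : Int) :
    (PySem.List.slice xs none (some b)).Sublist xs := by
  by_cases hb : 0 ≤ b
  · rw [PySem.List.slice_to (xs := xs) (b := b) hb]; exact List.take_sublist _ _
  · have hb : b < 0 := by omega
    have hk : 0 < (-b).toNat := by omega
    rw [show b = -(((-b).toNat : Nat) : Int) from by omega,
      PySem.List.slice_to_neg_natCast xs _ hk]
    exact List.take_sublist _ _

theorem pv_pairs_sublist (sel : List (String × List Int)) (pl : Int) :
    (pvPairs sel pl).Sublist (pvAllP sel) := by
  unfold pvPairs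
  split
  · exact pv_slice_to_sublist _ _
  · exact List.Sublist.refl _

theorem pv_countswap {α : Type} [BEq α] [LawfulBEq α] (l1 l2 : List α)
    (h1 : l1.Nodup) (h2 : l2.Nodup) :
    l1.countP (fun x => decide (x ∈ l2)) = l2.countP (fun x => decide (x ∈ l1)) := by
  rw [List.countP_eq_length_filter, List.countP_eq_length_filter]
  apply List.Perm.length_eq
  rw [List.perm_ext_iff_of_nodup (h1.filter _) (h2.filter _)]
  intro a
  simp only [List.mem_filter, decide_eq_true_eq]
  tauto

theorem pv_foldl_flatMap {α β σ : Type} (l : List α) (g : α → List β) (f : σ → β → σ)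
    (init : σ) : (l.flatMap g).foldl f init = l.foldl (fun a x => (g x).foldl f a) init := by
  induction l generalizing init with
  | nil => rfl
  | cons b t ih => rw [List.flatMap_cons, List.foldl_append, List.foldl_cons, ih]

theorem pv_count_flatMap {α β : Type} [BEq α] [LawfulBEq α] (l : List β) (g : β → List α)
    (hg : ∀ b ∈ l, (g b).Nodup) (a : α) :
    (l.flatMap g).count a = l.countP (fun b => decide (a ∈ g b)) := by
  induction l with
  | nil => simp
  | cons b t ih =>
    rw [List.flatMap_cons, List.count_append, List.countP_cons,
      ih (fun x hx => hg x (List.mem_cons_of_mem _ hx))]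
    by_cases hm : a ∈ g b
    · rw [List.count_eq_one_of_mem (hg b List.mem_cons_self) hm]
      simp [hm]; omega
    · rw [List.count_eq_zero_of_not_mem hm]
      simp [hm]

-- ---- occ / cs lemmas ----
theorem pv_cs_eq (sel : List (String × List Int)) {i : Int} (h0 : 0 ≤ i)
    (hm : i < (sel.length : Int)) (h : i.toNat < sel.length) :
    pvCs sel i = (sel[i.toNat]).2 := by
  unfold pvCs
  conv_lhs => rw [show i = ((i.toNat : Nat) : Int) from by omega]
  rw [PySem.List.pyGetD_natCast, List.getD_eq_getElem?_getD, List.getElem?_eq_getElem h]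
  rfl

theorem pv_occ_pairwise (sel : List (String × List Int)) (cid : Int) :
    (pvOcc sel cid).Pairwise (· < ·) := by
  unfold pvOcc
  exact List.Pairwise.map _ (fun a b hab => hab)
    ((PySem.List.pairwise_lt_enumerate sel 0).filter _)

theorem pv_mem_occ (sel : List (String × List Int)) (cid : Int) {i : Int}
    (h0 : 0 ≤ i) (hm : i < (sel.length : Int)) :
    i ∈ pvOcc sel cid ↔ cid ∈ pvCs sel i := by
  have hlt : i.toNat < sel.length := by omega
  rw [pv_cs_eq sel h0 hm hlt]
  unfold pvOcc
  simp only [List.mem_map, List.mem_filter, PySem.List.mem_enumerate_iff, decide_eq_true_eq]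
  constructor
  · rintro ⟨ip, ⟨⟨k, hk, rfl⟩, hcid⟩, hfst⟩
    have hk' : i.toNat = k := by simp at hfst; omega
    subst hk'
    exact hcid
  · intro hc
    refine ⟨((i : Int), sel[i.toNat]), ⟨⟨i.toNat, hlt, by simp; omega⟩, hc⟩, rfl⟩

theorem pv_cs_nodup (sel : List (String × List Int)) (hN : ∀ q ∈ sel, q.2.Nodup) (i : Int) :
    (pvCs sel i).Nodup := by
  have he : pvCs sel i = ((PySem.List.pyGet? sel i).getD ("", [])).2 := rfl
  rcases h : PySem.List.pyGet? sel i with _ | x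
  · rw [he, h]; simp
  · rw [he, h]
    exact hN x (PySem.List.mem_of_pyGet?_eq_some sel h)

theorem pv_cs_subset_flat (sel : List (String × List Int)) {i : Int}
    (h0 : 0 ≤ i) (hm : i < (sel.length : Int)) {cid : Int} (hc : cid ∈ pvCs sel i) :
    cid ∈ pvFlat sel := by
  have hlt : i.toNat < sel.length := by omega
  rw [pv_cs_eq sel h0 hm hlt] at hc
  exact List.mem_flatMap.mpr ⟨sel[i.toNat], List.getElem_mem hlt, hc⟩

theorem pv_enum_countP (sel : List (String × List Int)) (cid : Int) : ∀ s : Int,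
    (PySem.List.enumerate sel s).countP (fun ip => decide (cid ∈ ip.2.2)) =
      sel.countP (fun q => decide (cid ∈ q.2)) := by
  induction sel with
  | nil => intro s; rfl
  | cons q t ih =>
    intro s
    rw [PySem.List.enumerate_cons, List.countP_cons, List.countP_cons, ih (s + 1)]

theorem pv_occ_length (sel : List (String × List Int)) (hN : ∀ q ∈ sel, q.2.Nodup) (cid : Int) :
    ((pvOcc sel cid).length : Int) = ((pvFlat sel).count cid : Int) := by
  unfold pvOcc pvFlat
  rw [List.length_map, ← List.countP_eq_length_filter, pv_enum_countP sel cid 0,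
    pv_count_flatMap sel (fun q => q.2) hN cid]

theorem pv_inter_nodup (sel : List (String × List Int)) (hN : ∀ q ∈ sel, q.2.Nodup)
    (p : List Int) : (pvInter sel p).Nodup := by
  exact (pv_cs_nodup sel hN _).filter _

theorem pv_mem_combos_occ (sel : List (String × List Int)) {p : List Int} (cid : Int)
    (hp : p ∈ pvAllP sel) :
    (p ∈ PySem.List.combinations (pvOcc sel cid) 2) ↔ cid ∈ pvInter sel p := by
  obtain ⟨i, j, rfl, h0, hij, hjm⟩ := (pv_mem_allP sel _).mp hp
  have hocc := pv_occ_pairwise sel cid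
  have hint : pvInter sel [i, j] = PySem.Set.inter (pvCs sel i) (pvCs sel j) := rfl
  rw [hint, PySem.List.mem_combinations_iff, PySem.Set.mem_inter]
  constructor
  · rintro ⟨hsub, -⟩
    obtain ⟨hi, hj, -⟩ := (pv_pair_sublist hocc i j).mp hsub
    exact ⟨(pv_mem_occ sel cid h0 (by omega)).mp hi,
      (pv_mem_occ sel cid (by omega) hjm).mp hj⟩
  · rintro ⟨hci, hcj⟩
    refine ⟨(pv_pair_sublist hocc i j).mpr
      ⟨(pv_mem_occ sel cid h0 (by omega)).mpr hci,
       (pv_mem_occ sel cid (by omega) hjm).mpr hcj, hij⟩, rfl⟩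

theorem pv_size_eq (sel : List (String × List Int)) (pl : Int) (hN : ∀ q ∈ sel, q.2.Nodup)
    {p : List Int} (hp : p ∈ pvPairs sel pl) :
    ((pvInter sel p).length : Int) = pvSize sel pl p := by
  have hp' : p ∈ pvAllP sel := (pv_pairs_sublist sel pl).subset hp
  obtain ⟨i, j, rfl, h0, hij, hjm⟩ := (pv_mem_allP sel _).mp hp'
  unfold pvSize
  refine congrArg Nat.cast ?_
  rw [List.countP_congr (q := fun cid => decide (cid ∈ pvInter sel [i, j])) (fun cid _ => by
    simp only [decide_eq_true_eq]
    exact pv_mem_combos_occ sel cid hp')]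
  rw [pv_countswap _ _ (PySem.Set.nodup_ofList _) (pv_inter_nodup sel hN _)]
  symm
  rw [List.countP_eq_length]
  intro a ha
  simp only [decide_eq_true_eq, PySem.Set.mem_ofList]
  have hmem : a ∈ pvCs sel i := by
    have hf : a ∈ (pvCs sel i).filter ((pvCs sel j).contains) := ha
    exact (List.mem_filter.mp hf).1
  exact pv_cs_subset_flat sel h0 (by omega) hmem

theorem pv_pc_eq_occside (sel : List (String × List Int)) (pl : Int)
    (hN : ∀ q ∈ sel, q.2.Nodup) (cid : Int) :
    ((PySem.List.combinations (pvOcc sel cid) 2).countP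
        (fun q => decide (q ∈ pvPairs sel pl)) : Int) = pvPc sel pl cid := by
  unfold pvPc
  refine congrArg Nat.cast ?_
  have hnodupC : (PySem.List.combinations (pvOcc sel cid) 2).Nodup :=
    pv_comb_nodup _ _ ((pv_occ_pairwise sel cid).imp (fun h => by omega))
  have hnodupP : (pvPairs sel pl).Nodup :=
    (pv_pairs_sublist sel pl).nodup (pv_allP_nodup sel)
  rw [pv_countswap _ _ hnodupC hnodupP]
  exact List.countP_congr (fun p hp => by
    simp only [decide_eq_true_eq]
    exact pv_mem_combos_occ sel cid ((pv_pairs_sublist sel pl).subset hp))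

theorem pv_buckets_getD (l : List (List Int)) (q : List Int) :
    ((l.foldl (fun d p => d.insert p 0) (PySem.Dict.empty : PySem.Dict (List Int) Int)).getD q 0) = 0 := by
  suffices h : ∀ (d : PySem.Dict (List Int) Int), (∀ q', d.getD q' 0 = 0) →
      ∀ q, ((l.foldl (fun d p => d.insert p 0) d).getD q 0) = 0 by
    exact h _ (fun q' => PySem.Dict.getD_empty q' 0) q
  intro d hd q
  induction l generalizing d with
  | nil => exact hd q
  | cons p t ih =>
    rw [List.foldl_cons]
    refine ih (d.insert p 0) (fun q' => ?_)
    rw [PySem.Dict.getD_insert]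
    split
    · rfl
    · exact hd q'

theorem pv_flatMap_congr {α β : Type} (l : List α) (f g : α → List β)
    (h : ∀ a ∈ l, f a = g a) : l.flatMap f = l.flatMap g := by
  induction l with
  | nil => rfl
  | cons a t ih =>
    rw [List.flatMap_cons, List.flatMap_cons, h a List.mem_cons_self,
      ih (fun x hx => h x (List.mem_cons_of_mem _ hx))]

theorem pv_group_head (cid : Int) (i : Int) (cs : List Int) (hnd : cs.Nodup) :
    ((cs.map (fun c => (c, i))).filter (fun pr => pr.1 == cid)).map (fun pr => pr.2)
      = if cid ∈ cs then [i] else [] := by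
  rw [List.filter_map, List.map_map]
  have hpred : ((fun pr : Int × Int => pr.1 == cid) ∘ (fun c => (c, i))) = fun c => c == cid := rfl
  rw [hpred, List.filter_beq]
  by_cases hm : cid ∈ cs
  · rw [List.count_eq_one_of_mem hnd hm, if_pos hm]; rfl
  · rw [List.count_eq_zero_of_not_mem hm, if_neg hm]; rfl

theorem pv_group_snd (cid : Int) (l : List (Int × (String × List Int)))
    (hl : ∀ ip ∈ l, ip.2.2.Nodup) :
    ((l.flatMap (fun ip => ip.2.2.map (fun c => (c, ip.1)))).filter
        (fun pr => pr.1 == cid)).map (fun pr => pr.2)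
      = (l.filter (fun ip => decide (cid ∈ ip.2.2))).map (fun ip => ip.1) := by
  induction l with
  | nil => rfl
  | cons ip t ih =>
    rw [List.flatMap_cons, List.filter_append, List.map_append,
      ih (fun x hx => hl x (List.mem_cons_of_mem _ hx)),
      pv_group_head cid ip.1 ip.2.2 (hl ip List.mem_cons_self)]
    by_cases hm : cid ∈ ip.2.2
    · rw [if_pos hm, List.filter_cons_of_pos (by simpa using hm), List.map_cons,
        List.singleton_append]
    · rw [if_neg hm, List.filter_cons_of_neg (by simpa using hm), List.nil_append]

-- ---- canonical form of the result ----
def pvOut (sel : List (String × List Int)) (pl : Int) : (List (Int × Int × Int)) × List Int :=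
  (PySem.List.sorted ((PySem.Set.ofList (pvFlat sel)).map
      (fun cid => (cid, pvPc sel pl cid, pvSc sel cid))) pvKey3,
   (pvPairs sel pl).map (pvSize sel pl))

def pvStepF (sel : List (String × List Int)) (pl : Int)
    (d : PySem.Dict (List Int) Int) (item : Int × List Int) : PySem.Dict (List Int) Int :=
  (PySem.List.combinations item.2 2).foldl
    (fun (d : PySem.Dict (List Int) Int) q =>
      if PySem.Set.contains (PySem.Set.ofList (pvPairs sel pl)) q then d.modify q 0 (· + 1) else d) d

def pvStepG (sel : List (String × List Int)) (pl : Int)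
    (acc : List (Int × Int × Int)) (item : Int × List Int) : List (Int × Int × Int) :=
  acc ++ [(item.1,
    (PySem.List.combinations item.2 2).foldl
      (fun (c : Int) q =>
        if PySem.Set.contains (PySem.Set.ofList (pvPairs sel pl)) q then c + 1 else c) 0,
    (item.2.length : Int))]

theorem pv_map_fst_pair (i : Int) (cs : List Int) :
    List.map Prod.fst (List.map (fun c => (c, i)) cs) = cs := by
  induction cs with
  | nil => rfl
  | cons c t ih => simpa using ih

theorem pv_bodyA_eq (sel : List (String × List Int)) (pair_limit : Int)
    (hN : ∀ q ∈ sel, q.2.Nodup) :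
    (let singleton_counter : PySem.Dict Int Int :=
      sel.foldl (fun d p => p.2.foldl (fun d cid => d.modify cid 0 (· + 1)) d) PySem.Dict.empty
    let all_pairs := PySem.List.combinations (PySem.List.pyRange 0 (sel.length : Int)) 2
    let all_pairs := if (all_pairs.length : Int) > pair_limit then PySem.List.slice all_pairs none (some pair_limit) else all_pairs
    let st := all_pairs.foldl (fun (st : PySem.Dict Int Int × List Int) pr =>
        let i := PySem.List.pyGetD pr 0 0
        let j := PySem.List.pyGetD pr 1 0
        let cset := PySem.Set.inter (PySem.List.pyGetD sel i ("", [])).2 (PySem.List.pyGetD sel j ("", [])).2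
        (cset.foldl (fun d cid => d.modify cid 0 (· + 1)) st.1, st.2 ++ [(cset.length : Int)]))
      (PySem.Dict.empty, [])
    let pair_counter := st.1
    let pair_sizes := st.2
    let candidate_ids := PySem.Set.union (PySem.Set.ofList pair_counter.keys) singleton_counter.keys
    let ranked := candidate_ids.foldl
      (fun acc cid => acc ++ [(cid, pair_counter.getD cid 0, singleton_counter.getD cid 0)]) []
    (PySem.List.sorted ranked pvKey3, pair_sizes)) = pvOut sel pair_limit := by
  dsimp only
  rw [show (if (((PySem.List.combinations (PySem.List.pyRange 0 (sel.length : Int)) 2).length : Int) > pair_limit)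
      then PySem.List.slice (PySem.List.combinations (PySem.List.pyRange 0 (sel.length : Int)) 2) none (some pair_limit)
      else PySem.List.combinations (PySem.List.pyRange 0 (sel.length : Int)) 2) = pvPairs sel pair_limit from rfl]
  -- split the pair-loop into its two independent accumulators
  have hstA : (pvPairs sel pair_limit).foldl (fun (st : PySem.Dict Int Int × List Int) pr =>
        let i := PySem.List.pyGetD pr 0 0
        let j := PySem.List.pyGetD pr 1 0
        let cset := PySem.Set.inter (PySem.List.pyGetD sel i ("", [])).2 (PySem.List.pyGetD sel j ("", [])).2
        (cset.foldl (fun d cid => d.modify cid 0 (· + 1)) st.1, st.2 ++ [(cset.length : Int)]))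
      (PySem.Dict.empty, []) =
      ((pvPairs sel pair_limit).foldl
        (fun d pr => (pvInter sel pr).foldl (fun d cid => d.modify cid 0 (· + 1)) d) PySem.Dict.empty,
       (pvPairs sel pair_limit).foldl (fun l pr => l ++ [((pvInter sel pr).length : Int)]) []) :=
    PySem.List.foldl_prod_mk
      (f := fun (d : PySem.Dict Int Int) pr => (pvInter sel pr).foldl (fun d cid => d.modify cid 0 (· + 1)) d)
      (g := fun (l : List Int) pr => l ++ [((pvInter sel pr).length : Int)]) (pvPairs sel pair_limit)
      PySem.Dict.empty []
  rw [hstA]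
  dsimp only
  -- the singleton Counter is the counter of the flattened chunk lists
  have hsingle : ∀ cid : Int,
      (sel.foldl (fun d p => p.2.foldl (fun d cid => d.modify cid 0 (· + 1)) d)
        (PySem.Dict.empty : PySem.Dict Int Int)).getD cid 0 = pvSc sel cid := by
    intro cid
    rw [← pv_foldl_flatMap sel (fun p => p.2) (fun (d : PySem.Dict Int Int) cid => d.modify cid 0 (· + 1)) PySem.Dict.empty,
      PySem.Dict.getD_foldl_modify_add_one, PySem.Dict.getD_empty]
    unfold pvSc pvFlat
    omega
  -- the pair Counter counts, per cid, the allowed pairs whose intersection holds cid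
  have hpc : ∀ cid : Int,
      ((pvPairs sel pair_limit).foldl
        (fun d pr => (pvInter sel pr).foldl (fun d cid => d.modify cid 0 (· + 1)) d)
        (PySem.Dict.empty : PySem.Dict Int Int)).getD cid 0 = pvPc sel pair_limit cid := by
    intro cid
    rw [← pv_foldl_flatMap (pvPairs sel pair_limit) (pvInter sel)
        (fun (d : PySem.Dict Int Int) cid => d.modify cid 0 (· + 1)) PySem.Dict.empty,
      PySem.Dict.getD_foldl_modify_add_one, PySem.Dict.getD_empty,
      pv_count_flatMap (pvPairs sel pair_limit) (pvInter sel)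
        (fun p _ => pv_inter_nodup sel hN p) cid]
    unfold pvPc
    omega
  -- key sets
  have hkeysS : (sel.foldl (fun d p => p.2.foldl (fun d cid => d.modify cid 0 (· + 1)) d)
        (PySem.Dict.empty : PySem.Dict Int Int)).keys = PySem.Set.ofList (pvFlat sel) := by
    rw [← pv_foldl_flatMap sel (fun p => p.2) (fun (d : PySem.Dict Int Int) cid => d.modify cid 0 (· + 1)) PySem.Dict.empty]
    exact PySem.Dict.keys_foldl_modify (pvFlat sel) 0 (fun _ _ => (· + 1)) PySem.Dict.empty
  have hkeysP : ((pvPairs sel pair_limit).foldl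
        (fun d pr => (pvInter sel pr).foldl (fun d cid => d.modify cid 0 (· + 1)) d)
        (PySem.Dict.empty : PySem.Dict Int Int)).keys =
      PySem.Set.ofList ((pvPairs sel pair_limit).flatMap (pvInter sel)) := by
    rw [← pv_foldl_flatMap (pvPairs sel pair_limit) (pvInter sel)
        (fun (d : PySem.Dict Int Int) cid => d.modify cid 0 (· + 1)) PySem.Dict.empty]
    exact PySem.Dict.keys_foldl_modify _ 0 (fun _ _ => (· + 1)) PySem.Dict.empty
  rw [hkeysS, hkeysP]
  -- the candidate-id set is, as a set, the flattened chunk list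
  have hcand_nodup : (PySem.Set.union
      (PySem.Set.ofList (PySem.Set.ofList ((pvPairs sel pair_limit).flatMap (pvInter sel))))
      (PySem.Set.ofList (pvFlat sel))).Nodup :=
    PySem.Set.nodup_update _ _ (PySem.Set.nodup_ofList _)
  have hcand_mem : ∀ a : Int, a ∈ PySem.Set.union
      (PySem.Set.ofList (PySem.Set.ofList ((pvPairs sel pair_limit).flatMap (pvInter sel))))
      (PySem.Set.ofList (pvFlat sel)) ↔ a ∈ PySem.Set.ofList (pvFlat sel) := by
    intro a
    rw [PySem.Set.mem_union, PySem.Set.mem_ofList, PySem.Set.mem_ofList, PySem.Set.mem_ofList]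
    constructor
    · rintro (ha | ha)
      · obtain ⟨p, hp, hap⟩ := List.mem_flatMap.mp ha
        obtain ⟨i, j, rfl, h0, hij, hjm⟩ :=
          (pv_mem_allP sel p).mp ((pv_pairs_sublist sel pair_limit).subset hp)
        have hmem : a ∈ pvCs sel i := by
          have hf : a ∈ (pvCs sel i).filter ((pvCs sel j).contains) := hap
          exact (List.mem_filter.mp hf).1
        exact pv_cs_subset_flat sel h0 (by omega) hmem
      · exact ha
    · intro ha
      exact Or.inr ha
  have hperm : (PySem.Set.union
      (PySem.Set.ofList (PySem.Set.ofList ((pvPairs sel pair_limit).flatMap (pvInter sel))))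
      (PySem.Set.ofList (pvFlat sel))).Perm (PySem.Set.ofList (pvFlat sel)) :=
    (List.perm_ext_iff_of_nodup hcand_nodup (PySem.Set.nodup_ofList _)).mpr hcand_mem
  refine Prod.ext_iff.mpr ⟨?_, ?_⟩
  · -- ranked component
    dsimp only [pvOut]
    rw [PySem.List.foldl_append_singleton_eq_map, List.nil_append]
    rw [List.map_congr_left (fun a _ => by rw [hpc a, hsingle a])]
    exact PySem.List.sorted_eq_sorted_of_perm _ _ pvKey3 pvKey3_inj
      (hperm.map (fun cid => (cid, pvPc sel pair_limit cid, pvSc sel cid)))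
  · -- pair_sizes component
    dsimp only [pvOut]
    rw [PySem.List.foldl_append_singleton_eq_map, List.nil_append]
    exact List.map_congr_left (fun p hp => pv_size_eq sel pair_limit hN hp)

theorem pv_bodyB_eq (sel : List (String × List Int)) (pair_limit : Int)
    (hN : ∀ q ∈ sel, q.2.Nodup) :
    (let all_pairs := PySem.List.combinations (PySem.List.pyRange 0 (sel.length : Int)) 2
    let all_pairs := if (all_pairs.length : Int) > pair_limit then PySem.List.slice all_pairs none (some pair_limit) else all_pairs
    let allowed := PySem.Set.ofList all_pairs
    let inv : PySem.Dict Int (List Int) :=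
      (PySem.List.enumerate sel).foldl
        (fun d ip => ip.2.2.foldl (fun d cid => d.modify cid [] (· ++ [ip.1])) d) PySem.Dict.empty
    let buckets : PySem.Dict (List Int) Int := all_pairs.foldl (fun d p => d.insert p 0) PySem.Dict.empty
    let st := inv.items.foldl
      (fun (st : PySem.Dict (List Int) Int × List (Int × Int × Int)) item =>
        let inner := (PySem.List.combinations item.2 2).foldl
          (fun (s : Int × PySem.Dict (List Int) Int) q =>
            if PySem.Set.contains allowed q then (s.1 + 1, s.2.modify q 0 (· + 1)) else s)
          (0, st.1)
        (inner.2, st.2 ++ [(item.1, inner.1, (item.2.length : Int))]))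
      (buckets, [])
    (PySem.List.sorted st.2 pvKey3, all_pairs.map (fun p => st.1.getD p 0))) = pvOut sel pair_limit := by
  dsimp only
  rw [show (if (((PySem.List.combinations (PySem.List.pyRange 0 (sel.length : Int)) 2).length : Int) > pair_limit)
      then PySem.List.slice (PySem.List.combinations (PySem.List.pyRange 0 (sel.length : Int)) 2) none (some pair_limit)
      else PySem.List.combinations (PySem.List.pyRange 0 (sel.length : Int)) 2) = pvPairs sel pair_limit from rfl]
  -- the inverted index as a single key-value fold
  have hinv : (PySem.List.enumerate sel).foldl
      (fun d ip => ip.2.2.foldl (fun d cid => d.modify cid [] (· ++ [ip.1])) d)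
      (PySem.Dict.empty : PySem.Dict Int (List Int)) =
      ((PySem.List.enumerate sel).flatMap (fun ip => ip.2.2.map (fun c => (c, ip.1)))).foldl
        (fun (d : PySem.Dict Int (List Int)) pr => d.modify pr.1 [] (· ++ [pr.2])) PySem.Dict.empty := by
    rw [pv_foldl_flatMap (PySem.List.enumerate sel) (fun ip => ip.2.2.map (fun c => (c, ip.1)))
      (fun (d : PySem.Dict Int (List Int)) pr => d.modify pr.1 [] (· ++ [pr.2])) PySem.Dict.empty]
    exact PySem.List.foldl_congr_mem' _ _ _ _ (fun ip _ acc =>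
      (List.foldl_map (f := fun c : Int => (c, ip.1))
        (g := fun (d : PySem.Dict Int (List Int)) pr => d.modify pr.1 [] (· ++ [pr.2]))
        (l := ip.2.2) (init := acc)).symm)
  rw [hinv]
  have hnodups : ∀ ip ∈ PySem.List.enumerate sel, (ip.2.2 : List Int).Nodup := by
    intro ip hip
    obtain ⟨k, hk, rfl⟩ := (PySem.List.mem_enumerate_iff sel 0 ip).mp hip
    exact hN _ (List.getElem_mem hk)
  -- the stored index lists are exactly pvOcc
  have hgetD : ∀ cid : Int, (((PySem.List.enumerate sel).flatMap
        (fun ip => ip.2.2.map (fun c => (c, ip.1)))).foldl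
        (fun (d : PySem.Dict Int (List Int)) pr => d.modify pr.1 [] (· ++ [pr.2]))
        PySem.Dict.empty).getD cid [] = pvOcc sel cid := by
    intro cid
    rw [PySem.Dict.getD_foldl_modify_append _ PySem.Dict.empty cid,
      show (PySem.Dict.empty : PySem.Dict Int (List Int)).getD cid [] = [] from rfl,
      List.nil_append]
    unfold pvOcc
    exact pv_group_snd cid (PySem.List.enumerate sel) hnodups
  -- the key set of the inverted index
  have hkeys : (((PySem.List.enumerate sel).flatMap
        (fun ip => ip.2.2.map (fun c => (c, ip.1)))).foldl
        (fun (d : PySem.Dict Int (List Int)) pr => d.modify pr.1 [] (· ++ [pr.2]))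
        PySem.Dict.empty).keys = PySem.Set.ofList (pvFlat sel) := by
    have h1 : (((PySem.List.enumerate sel).flatMap
        (fun ip => ip.2.2.map (fun c => (c, ip.1)))).foldl
        (fun (d : PySem.Dict Int (List Int)) pr => d.modify pr.1 [] (· ++ [pr.2]))
        PySem.Dict.empty).keys = PySem.Set.update (PySem.Dict.empty : PySem.Dict Int (List Int)).keys
          (((PySem.List.enumerate sel).flatMap (fun ip => ip.2.2.map (fun c => (c, ip.1)))).map Prod.fst) :=
      PySem.Dict.keys_foldl_modify_key _ Prod.fst [] (fun _ pr => (· ++ [pr.2])) PySem.Dict.empty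
    rw [h1]
    have h2 : ((PySem.List.enumerate sel).flatMap (fun ip => ip.2.2.map (fun c => (c, ip.1)))).map Prod.fst
        = pvFlat sel := by
      rw [List.map_flatMap]
      unfold pvFlat
      have h3 : sel.flatMap (fun p => p.2) =
          ((PySem.List.enumerate sel).map (fun x => x.2)).flatMap (fun p => p.2) := by
        rw [PySem.List.map_snd_enumerate]
      rw [h3, List.flatMap_map]
      refine pv_flatMap_congr _ _ _ (fun ip _ => ?_)
      exact pv_map_fst_pair ip.1 ip.2.2
    rw [h2]
    rfl
  have hnodupkeys : (((PySem.List.enumerate sel).flatMap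
        (fun ip => ip.2.2.map (fun c => (c, ip.1)))).foldl
        (fun (d : PySem.Dict Int (List Int)) pr => d.modify pr.1 [] (· ++ [pr.2]))
        PySem.Dict.empty).keys.Nodup := by
    rw [hkeys]; exact PySem.Set.nodup_ofList _
  have hitems : (((PySem.List.enumerate sel).flatMap
        (fun ip => ip.2.2.map (fun c => (c, ip.1)))).foldl
        (fun (d : PySem.Dict Int (List Int)) pr => d.modify pr.1 [] (· ++ [pr.2]))
        PySem.Dict.empty).items =
      (PySem.Set.ofList (pvFlat sel)).map (fun k => (k, pvOcc sel k)) := by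
    rw [PySem.Dict.items_eq_map_keys _ hnodupkeys [], hkeys]
    exact List.map_congr_left (fun k _ => by rw [hgetD k])
  rw [hitems]
  -- split the main loop into its two independent accumulators
  have hstep : ∀ (st : PySem.Dict (List Int) Int × List (Int × Int × Int))
      (item : Int × List Int),
      (((PySem.List.combinations item.2 2).foldl
          (fun (s : Int × PySem.Dict (List Int) Int) q =>
            if PySem.Set.contains (PySem.Set.ofList (pvPairs sel pair_limit)) q then
              (s.1 + 1, s.2.modify q 0 (· + 1)) else s) (0, st.1)).2,
       st.2 ++ [(item.1,
          ((PySem.List.combinations item.2 2).foldl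
            (fun (s : Int × PySem.Dict (List Int) Int) q =>
              if PySem.Set.contains (PySem.Set.ofList (pvPairs sel pair_limit)) q then
                (s.1 + 1, s.2.modify q 0 (· + 1)) else s) (0, st.1)).1,
          (item.2.length : Int))]) =
      (pvStepF sel pair_limit st.1 item, pvStepG sel pair_limit st.2 item) := by
    intro st item
    have hinner : (PySem.List.combinations item.2 2).foldl
        (fun (s : Int × PySem.Dict (List Int) Int) q =>
          if PySem.Set.contains (PySem.Set.ofList (pvPairs sel pair_limit)) q then
            (s.1 + 1, s.2.modify q 0 (· + 1)) else s)
        (0, st.1) =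
        ((PySem.List.combinations item.2 2).foldl
          (fun (c : Int) q =>
            if PySem.Set.contains (PySem.Set.ofList (pvPairs sel pair_limit)) q then c + 1 else c) 0,
         (PySem.List.combinations item.2 2).foldl
          (fun (d : PySem.Dict (List Int) Int) q =>
            if PySem.Set.contains (PySem.Set.ofList (pvPairs sel pair_limit)) q then
              d.modify q 0 (· + 1) else d) st.1) := by
      rw [PySem.List.foldl_congr_mem' _ _
        (fun (s : Int × PySem.Dict (List Int) Int) q =>
          ((if PySem.Set.contains (PySem.Set.ofList (pvPairs sel pair_limit)) q then s.1 + 1 else s.1),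
           (if PySem.Set.contains (PySem.Set.ofList (pvPairs sel pair_limit)) q then s.2.modify q 0 (· + 1) else s.2)))
        _ (fun q _ s => by show _ = (_, _); split_ifs <;> rfl)]
      exact PySem.List.foldl_prod_mk
        (f := fun (c : Int) q =>
          if PySem.Set.contains (PySem.Set.ofList (pvPairs sel pair_limit)) q then c + 1 else c)
        (g := fun (d : PySem.Dict (List Int) Int) q =>
          if PySem.Set.contains (PySem.Set.ofList (pvPairs sel pair_limit)) q then
            d.modify q 0 (· + 1) else d)
        (PySem.List.combinations item.2 2) 0 st.1
    rw [hinner]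
    rfl
  rw [(PySem.List.foldl_congr_mem'
      ((PySem.Set.ofList (pvFlat sel)).map (fun k => (k, pvOcc sel k))) _
      (fun (st : PySem.Dict (List Int) Int × List (Int × Int × Int)) item =>
        (pvStepF sel pair_limit st.1 item, pvStepG sel pair_limit st.2 item))
      ((pvPairs sel pair_limit).foldl (fun d p => d.insert p 0) PySem.Dict.empty, [])
      (fun item _ st => hstep st item)).trans
    (PySem.List.foldl_prod_mk (f := pvStepF sel pair_limit) (g := pvStepG sel pair_limit)
      ((PySem.Set.ofList (pvFlat sel)).map (fun k => (k, pvOcc sel k)))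
      ((pvPairs sel pair_limit).foldl (fun d p => d.insert p 0) PySem.Dict.empty) [])]
  dsimp only
  -- boolean membership in the allowed-pair set
  have hcont : ∀ q : List Int,
      PySem.Set.contains (PySem.Set.ofList (pvPairs sel pair_limit)) q =
        decide (q ∈ pvPairs sel pair_limit) := by
    intro q
    simp [PySem.Set.contains, PySem.Set.mem_ofList]
  refine Prod.ext_iff.mpr ⟨?_, ?_⟩
  · -- ranked component
    dsimp only [pvOut]
    rw [PySem.List.foldl_congr_mem'
      ((PySem.Set.ofList (pvFlat sel)).map (fun k => (k, pvOcc sel k)))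
      (pvStepG sel pair_limit)
      (fun (acc : List (Int × Int × Int)) (item : Int × List Int) =>
        acc ++ [(item.1,
          (PySem.List.combinations item.2 2).foldl
            (fun (c : Int) q =>
              if PySem.Set.contains (PySem.Set.ofList (pvPairs sel pair_limit)) q then c + 1 else c) 0,
          (item.2.length : Int))]) []
      (fun item _ acc => rfl)]
    rw [PySem.List.foldl_append_singleton_eq_map, List.nil_append, List.map_map]
    refine congrArg (fun l => PySem.List.sorted l pvKey3) ?_
    refine List.map_congr_left (fun cid _ => ?_)
    dsimp only [Function.comp]
    refine Prod.ext_iff.mpr ⟨rfl, Prod.ext_iff.mpr ⟨?_, ?_⟩⟩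
    · -- pair support
      dsimp only
      rw [PySem.List.foldl_if_add_one
        (fun q => PySem.Set.contains (PySem.Set.ofList (pvPairs sel pair_limit)) q)
        (PySem.List.combinations (pvOcc sel cid) 2) 0, zero_add]
      rw [List.countP_congr (fun q _ => by rw [hcont q])]
      exact pv_pc_eq_occside sel pair_limit hN cid
    · -- singleton support
      exact pv_occ_length sel hN cid
  · -- pair_sizes component
    dsimp only [pvOut]
    have hF : ((PySem.Set.ofList (pvFlat sel)).map (fun k => (k, pvOcc sel k))).foldl
        (pvStepF sel pair_limit)
        ((pvPairs sel pair_limit).foldl (fun d p => d.insert p 0) PySem.Dict.empty) =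
        (((PySem.Set.ofList (pvFlat sel)).map (fun k => (k, pvOcc sel k))).flatMap
          (fun it => (PySem.List.combinations it.2 2).filter
            (fun q => PySem.Set.contains (PySem.Set.ofList (pvPairs sel pair_limit)) q))).foldl
          (fun (d : PySem.Dict (List Int) Int) q => d.modify q 0 (· + 1))
          ((pvPairs sel pair_limit).foldl (fun d p => d.insert p 0) PySem.Dict.empty) := by
      rw [pv_foldl_flatMap]
      exact PySem.List.foldl_congr_mem' _ _ _ _
        (fun it _ acc => PySem.List.foldl_if_eq_foldl_filter
          (fun q => PySem.Set.contains (PySem.Set.ofList (pvPairs sel pair_limit)) q)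
          (fun (d : PySem.Dict (List Int) Int) q => d.modify q 0 (· + 1))
          (PySem.List.combinations it.2 2) acc)

    rw [hF]
    refine List.map_congr_left (fun p hp => ?_)
    rw [PySem.Dict.getD_foldl_modify_add_one, pv_buckets_getD, zero_add]
    have hblocks : ∀ it ∈ (PySem.Set.ofList (pvFlat sel)).map (fun k => (k, pvOcc sel k)),
        ((PySem.List.combinations (it : Int × List Int).2 2).filter
          (fun q => PySem.Set.contains (PySem.Set.ofList (pvPairs sel pair_limit)) q)).Nodup := by
      intro it hit
      obtain ⟨k, -, rfl⟩ := List.mem_map.mp hit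
      exact List.Nodup.filter _
        (pv_comb_nodup _ _ ((pv_occ_pairwise sel k).imp (fun h => by omega)))
    rw [pv_count_flatMap _ _ hblocks p]
    rw [List.countP_map]
    unfold pvSize
    refine congrArg Nat.cast ?_
    refine List.countP_congr (fun k _ => ?_)
    dsimp only [Function.comp]
    simp only [decide_eq_true_eq]
    rw [List.mem_filter]
    constructor
    · rintro ⟨hmem, -⟩
      exact hmem
    · intro hmem
      refine ⟨hmem, ?_⟩
      rw [hcont p]
      simpa using hp

-- ---- the master lemma: the two else-branches agree on any selected list ----
theorem pv_master (sel : List (String × List Int)) (pair_limit : Int)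
    (hN : ∀ q ∈ sel, q.2.Nodup) :
    (let singleton_counter : PySem.Dict Int Int :=
      sel.foldl (fun d p => p.2.foldl (fun d cid => d.modify cid 0 (· + 1)) d) PySem.Dict.empty
    let all_pairs := PySem.List.combinations (PySem.List.pyRange 0 (sel.length : Int)) 2
    let all_pairs := if (all_pairs.length : Int) > pair_limit then PySem.List.slice all_pairs none (some pair_limit) else all_pairs
    let st := all_pairs.foldl (fun (st : PySem.Dict Int Int × List Int) pr =>
        let i := PySem.List.pyGetD pr 0 0
        let j := PySem.List.pyGetD pr 1 0
        let cset := PySem.Set.inter (PySem.List.pyGetD sel i ("", [])).2 (PySem.List.pyGetD sel j ("", [])).2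
        (cset.foldl (fun d cid => d.modify cid 0 (· + 1)) st.1, st.2 ++ [(cset.length : Int)]))
      (PySem.Dict.empty, [])
    let pair_counter := st.1
    let pair_sizes := st.2
    let candidate_ids := PySem.Set.union (PySem.Set.ofList pair_counter.keys) singleton_counter.keys
    let ranked := candidate_ids.foldl
      (fun acc cid => acc ++ [(cid, pair_counter.getD cid 0, singleton_counter.getD cid 0)]) []
    (PySem.List.sorted ranked pvKey3, pair_sizes)) =
    (let all_pairs := PySem.List.combinations (PySem.List.pyRange 0 (sel.length : Int)) 2
    let all_pairs := if (all_pairs.length : Int) > pair_limit then PySem.List.slice all_pairs none (some pair_limit) else all_pairs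
    let allowed := PySem.Set.ofList all_pairs
    let inv : PySem.Dict Int (List Int) :=
      (PySem.List.enumerate sel).foldl
        (fun d ip => ip.2.2.foldl (fun d cid => d.modify cid [] (· ++ [ip.1])) d) PySem.Dict.empty
    let buckets : PySem.Dict (List Int) Int := all_pairs.foldl (fun d p => d.insert p 0) PySem.Dict.empty
    let st := inv.items.foldl
      (fun (st : PySem.Dict (List Int) Int × List (Int × Int × Int)) item =>
        let inner := (PySem.List.combinations item.2 2).foldl
          (fun (s : Int × PySem.Dict (List Int) Int) q =>
            if PySem.Set.contains allowed q then (s.1 + 1, s.2.modify q 0 (· + 1)) else s)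
          (0, st.1)
        (inner.2, st.2 ++ [(item.1, inner.1, (item.2.length : Int))]))
      (buckets, [])
    (PySem.List.sorted st.2 pvKey3, all_pairs.map (fun p => st.1.getD p 0))) := by
  exact (pv_bodyA_eq sel pair_limit hN).trans (pv_bodyB_eq sel pair_limit hN).symm


-- ===== VERDICT (by name: the statement is the Claim_ definition above) =====
theorem pv_take16_good (sc : List (String × List Int)) (q : String × List Int)
    (hq : q ∈ (PySem.List.sorted2
        ((sc.map (fun p => (p.1, PySem.Set.ofList p.2))).filter (fun p => !p.2.isEmpty))
        (fun x => ((x.2.length : Int))) (fun x => x.1) false).take 16) : q.2.Nodup := by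
  have h1 := List.mem_of_mem_take hq
  have h2 := (PySem.List.sorted2_perm _ _ _ _).mem_iff.mp h1
  have h3 := List.mem_of_mem_filter h2
  obtain ⟨p, -, hpq⟩ := List.mem_map.mp h3
  rw [← hpq]
  exact PySem.Set.nodup_ofList _

theorem pair_conjunction_rank_spec : Claim_equal_pair_conjunction_rank := by
  intro sc pl _
  unfold Spec_pair_conjunction_rank pair_conjunction_rank pair_conjunction_rank_alt
  have hsel2 : ∀ base : List (String × List Int),
      PySem.List.slice base none (some (16 : Int)) = base.take 16 := by
    intro base
    rw [PySem.List.slice_to (xs := base) (b := 16) (by norm_num)]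
    simp
  have hsel : ∀ base : List (String × List Int),
      PySem.List.slice base none (some (min (base.length : Int) 16)) = base.take 16 := by
    intro base
    rw [PySem.List.slice_to (xs := base) (b := min (base.length : Int) 16) (by omega)]
    rw [show (min (base.length : Int) 16).toNat = min base.length 16 from by omega]
    rw [← List.take_take]
    exact List.take_of_length_le (List.length_take_le' 16 base)
  simp only [hsel, hsel2]
  generalize hB : PySem.List.sorted2
      ((sc.map (fun p => (p.1, PySem.Set.ofList p.2))).filter (fun p => !p.2.isEmpty))
      (fun x => ((x.2.length : Int))) (fun x => x.1) = base
  have hlen : (base.take 16).length = min 16 base.length := List.length_take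
  have hgood : ∀ q ∈ base.take 16, q.2.Nodup := by
    intro q hq
    exact pv_take16_good sc q (hB ▸ hq)
  by_cases h2 : base.length < 2
  · rw [if_pos h2, if_pos (show (base.take 16).length < 2 by rw [hlen]; omega)]
  · rw [if_neg h2, if_neg (show ¬((base.take 16).length < 2) by rw [hlen]; omega)]
    exact pv_master (base.take 16) pl hgood
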